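-- pv_equiv track=rewrite | github.com/981377660LMT/algorithm-study | 19_数学/因数筛/莫比乌斯反演/lcm为k的子集个数.py | countSubsetLcm
-- ===== SOURCE A (Python) =====
-- from typing import List, Tuple
--
-- MOD = 998244353
--
-- def countSubsetLcm(nums: List[int], lcm_: int) -> int:
--     """lcm为k的子集个数(模mod)."""
--     if not nums:
--         return 0
--
--     pfs = getPrimeFactors(lcm_)
--     m = len(pfs)
--     counter = [0] * (1 << m)
--     for num in nums:
--         if lcm_ % num != 0:
--             continue
--         mask = 0
--         for i, (p, e) in enumerate(pfs):
--             if num % (p**e) == 0: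
--                 mask |= 1 << i
--         counter[mask] += 1
--
--     # divisorZeta
--     for i in range(m):
--         for pre in range(1 << m):
--             if (pre >> i) & 1 == 0:
--                 counter[pre | (1 << i)] += counter[pre]
--
--     dp = [pow(2, counter[i], MOD) - 1 for i in range(1 << m)]
--
--     # divisorMobius
--     for i in range(m):
--         for pre in range(1 << m):
--             if (pre >> i) & 1 == 0:
--                 dp[pre | (1 << i)] -= dp[pre]
--
--     res = dp[-1]
--     return res % MOD
--
-- def getPrimeFactors(n: int) -> List[Tuple[int, int]]:
--     """质因数分解.
--
--     >>> getPrimeFactors(100)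
--     [(2, 2), (5, 2)]
--     """
--     res = []
--     upper = n
--     i = 2
--     while i * i <= upper:
--         if upper % i == 0:
--             c = 0
--             while upper % i == 0:
--                 c += 1
--                 upper //= i
--             res.append((i, c))
--         i += 1
--     if upper != 1:
--         res.append((upper, 1))
--     return res
-- ===== SOURCE B (Python) =====
-- from typing import List, Tuple
--
-- MOD = 998244353
--
-- def countSubsetLcm(nums: List[int], lcm_: int) -> int:
--     """lcm为k的子集个数(模mod), by direct divisor-lattice inclusion-exclusion.
--
--     For every subset S of the prime-power factors q_i of lcm_, the number of
--     nonempty subsets of candidates avoiding the prime powers outside S is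
--     2^c - 1 where c counts candidates not divisible by any q_i outside S;
--     alternating over S (recursion on the factor list) gives the count with
--     lcm exactly lcm_.  No bitmask arrays and no in-place transforms.
--     """
--     facs = _factorize(lcm_, 2)
--     cands = [x for x in nums if lcm_ % x == 0]
--     return _alternate(list(reversed(facs)), cands) % MOD
--
-- def _alternate(facs: List[Tuple[int, int]], cands: List[int]) -> int:
--     if not facs:
--         return pow(2, len(cands), MOD) - 1
--     (p, e), rest = facs[0], facs[1:]
--     q = p ** e
--     return _alternate(rest, cands) - _alternate(rest, [x for x in cands if x % q != 0])
--
-- def _factorize(n: int, d: int) -> List[Tuple[int, int]]: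
--     """Trial division, one recursive call per prime factor found (list built on return)."""
--     while d * d <= n:
--         if n % d == 0:
--             cnt, rem = _strip(n, d)
--             return [(d, cnt)] + _factorize(rem, d + 1)
--         d += 1
--     return [(n, 1)] if n != 1 else []
--
-- def _strip(m: int, d: int) -> Tuple[int, int]:
--     if m % d != 0:
--         return (0, m)
--     cnt, rem = _strip(m // d, d)
--     return (cnt + 1, rem)
-- ===== Notes on version B (the rewrite author's own statement) =====
-- stated objective: alternative
-- what changed: Replaces the bitmask counter array and the two in-place SOS zeta/Moebius bit-flip transforms by a direct divisor-lattice inclusion-exclusion: a recursion over the prime-power factor list that filters the candidate list per excluded factor and alternates signs of (2^count - 1); factorization itself is a return-value recursion instead of A's nested accumulator loops; no bitmask arrays at all.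
import Mathlib
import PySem

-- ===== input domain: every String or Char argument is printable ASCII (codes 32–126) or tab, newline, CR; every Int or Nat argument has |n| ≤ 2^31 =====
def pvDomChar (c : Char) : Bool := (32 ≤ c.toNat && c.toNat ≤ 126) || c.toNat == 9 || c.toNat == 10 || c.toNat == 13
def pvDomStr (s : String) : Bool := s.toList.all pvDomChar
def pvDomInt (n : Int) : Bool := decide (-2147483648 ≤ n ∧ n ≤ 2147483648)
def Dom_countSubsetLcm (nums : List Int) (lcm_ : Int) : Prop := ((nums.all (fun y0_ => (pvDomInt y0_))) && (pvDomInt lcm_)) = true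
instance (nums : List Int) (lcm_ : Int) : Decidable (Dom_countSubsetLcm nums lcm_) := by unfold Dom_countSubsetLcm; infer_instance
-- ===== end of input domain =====

-- B replaces the counter array and the SOS zeta/Moebius transforms by a direct
-- inclusion-exclusion recursion over the prime-power factor list, with its own
-- recursive factorization (alternative decomposition, not claimed faster).
def MODP : Int := 998244353

-- ===== PORT A =====
-- getPrimeFactors, inner `while upper % i == 0` loop; returns (c, upper).
-- The `0 < upper ∧ 2 ≤ i` conjuncts are totality guards only (they hold whenever
-- Python reaches this loop, and ensure the division terminates).
theorem gpfInner_dec {i upper : Int} (h : 2 ≤ i ∧ 0 < upper ∧ PySem.Int.mod upper i = 0) :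
    (PySem.Int.floordiv upper i).toNat < upper.toNat := by
  rw [PySem.Int.floordiv_eq_ediv_of_pos (by omega)]
  have hq0 : 0 ≤ upper / i := Int.ediv_nonneg (by omega) (by omega)
  have hqm : upper / i * i ≤ upper := Int.ediv_mul_le upper (by omega)
  have hlt : upper / i < upper := by nlinarith [h.1, h.2.1]
  omega

def gpfInner (i upper c : Int) : Int × Int :=
  if h : 2 ≤ i ∧ 0 < upper ∧ PySem.Int.mod upper i = 0 then
    gpfInner i (PySem.Int.floordiv upper i) (c + 1)
  else (c, upper)
termination_by upper.toNat
decreasing_by exact gpfInner_dec h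

-- getPrimeFactors, outer `while i * i <= upper` loop; returns (upper, res).
-- `2 ≤ i` is a totality guard (Python starts at i = 2 and only increments).
-- gpfInner strictly shrinks upper when its guard holds (for gpfOuter's termination)
theorem gpfInner_le (i upper c : Int) : (gpfInner i upper c).2 ≤ upper := by
  fun_induction gpfInner i upper c with
  | case1 upper c h ih =>
      have hq0 : 0 ≤ PySem.Int.floordiv upper i := by
        rw [PySem.Int.floordiv_eq_ediv_of_pos (by omega)]
        exact Int.ediv_nonneg (by omega) (by omega)
      have hle : PySem.Int.floordiv upper i ≤ upper := by
        rw [PySem.Int.floordiv_eq_ediv_of_pos (by omega)]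
        have := Int.ediv_mul_le upper (b := i) (by omega)
        nlinarith [h.1, h.2.1]
      omega
  | case2 => simp

theorem gpfInner_lt (i upper c : Int) (hi : 2 ≤ i) (hu : 0 < upper)
    (hd : PySem.Int.mod upper i = 0) : (gpfInner i upper c).2 < upper := by
  rw [gpfInner, dif_pos ⟨hi, hu, hd⟩]
  have hle := gpfInner_le i (PySem.Int.floordiv upper i) (c + 1)
  have hlt : PySem.Int.floordiv upper i < upper := by
    rw [PySem.Int.floordiv_eq_ediv_of_pos (by omega)]
    have hq0 : 0 ≤ upper / i := Int.ediv_nonneg (by omega) (by omega)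
    have := Int.ediv_mul_le upper (b := i) (by omega)
    nlinarith
  omega

theorem gpfOuter_dec1 {upper i : Int} (h : 2 ≤ i ∧ i * i ≤ upper)
    (hdvd : PySem.Int.mod upper i = 0) :
    (gpfInner i upper 0).2.toNat + 1 - (i + 1).toNat < upper.toNat + 1 - i.toNat := by
  have hu : (4:Int) ≤ upper := le_trans (by nlinarith [h.1] : (4:Int) ≤ i * i) h.2
  have hlt : (gpfInner i upper 0).2 < upper := gpfInner_lt i upper 0 h.1 (by omega) hdvd
  have hiu : i + 1 ≤ upper := by nlinarith [h.1, h.2]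
  omega

theorem gpfOuter_dec2 {upper i : Int} (h : 2 ≤ i ∧ i * i ≤ upper) :
    upper.toNat + 1 - (i + 1).toNat < upper.toNat + 1 - i.toNat := by
  have hiu : i + 1 ≤ upper := by nlinarith [h.1, h.2]
  omega

def gpfOuter (upper i : Int) (res : List (Int × Int)) : Int × List (Int × Int) :=
  if h : 2 ≤ i ∧ i * i ≤ upper then
    if PySem.Int.mod upper i = 0 then
      let r := gpfInner i upper 0
      gpfOuter r.2 (i + 1) (res ++ [(i, r.1)])
    else gpfOuter upper (i + 1) res
  else (upper, res)
termination_by (upper.toNat + 1 - i.toNat)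
decreasing_by
  · exact gpfOuter_dec1 h (by assumption)
  · exact gpfOuter_dec2 h

def getPrimeFactorsA (n : Int) : List (Int × Int) :=
  let r := gpfOuter n 2 []
  if r.1 ≠ 1 then r.2 ++ [(r.1, 1)] else r.2

-- `for i, (p, e) in enumerate(pfs): if num % p**e == 0: mask |= 1 << i`.
-- Masks/indices are the nonnegative ints Python builds here; ported as Nat (exact).
-- e.toNat is exact: every exponent produced by getPrimeFactors is ≥ 1.
def maskAux (num : Int) (i : Nat) (fs : List (Int × Int)) (mask : Nat) : Nat :=
  match fs with
  | [] => mask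
  | (p, e) :: rest =>
      maskAux num (i + 1) rest
        (if PySem.Int.mod num (p ^ e.toNat) = 0 then mask ||| (1 <<< i) else mask)

-- loop body of `for num in nums: ...` (skip non-divisors, count masks)
def buildStep (lcm_ : Int) (pfs : List (Int × Int)) (cnt : List Int) (num : Int) : List Int :=
  if PySem.Int.mod lcm_ num ≠ 0 then cnt
  else
    let mask := maskAux num 0 pfs 0
    cnt.set mask (cnt.getD mask 0 + 1)

-- one pass `for pre in range(1 << m): if (pre >> i) & 1 == 0: l[pre | 1<<i] += sgn*l[pre]`
-- (sgn = 1 is the divisorZeta pass `+=`, sgn = -1 the divisorMobius pass `-=`).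
def sosPass (sgn : Int) (i N : Nat) (l : List Int) : List Int :=
  (List.range N).foldl
    (fun acc pre =>
      if (pre >>> i) &&& 1 = 0 then
        acc.set (pre ||| (1 <<< i))
          (acc.getD (pre ||| (1 <<< i)) 0 + sgn * acc.getD pre 0)
      else acc) l

-- pow(2, c, MOD) is PySem.Int.powMod with Nat exponent; c.toNat is exact because the
-- counter entries are (sums of) nonnegative counts.  dp[-1] exists (size 2^m ≥ 1),
-- so the .getD 0 default of pyGet? is never taken.
def countSubsetLcm (nums : List Int) (lcm_ : Int) : Int :=
  if nums = [] then 0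
  else
    let pfs := getPrimeFactorsA lcm_
    let m := pfs.length
    let counter1 : List Int := nums.foldl (buildStep lcm_ pfs) (List.replicate (1 <<< m) (0 : Int))
    let counter2 := (List.range m).foldl (fun c i => sosPass 1 i (1 <<< m) c) counter1
    let dp := (List.range (1 <<< m)).map
      (fun t => PySem.Int.powMod 2 (counter2.getD t 0).toNat MODP - 1)
    let dp2 := (List.range m).foldl (fun c i => sosPass (-1) i (1 <<< m) c) dp
    PySem.Int.mod ((PySem.List.pyGet? dp2 (-1)).getD 0) MODP

-- ===== PORT B =====
-- Source B's own MOD constant has the same value as A's; the ports share MODP.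
-- Source B's _strip: return-value recursion stripping factor d out of m.  The Nat
-- fuel argument is a totality guard only (callers pass more fuel than the loop
-- can consume, so the 0-fuel branch is never reached on any admitted input).
def stripB (fuel : Nat) (m d : Int) : Int × Int :=
  match fuel with
  | 0 => (0, m)
  | fuel + 1 =>
      if 2 ≤ d ∧ 0 < m ∧ PySem.Int.mod m d = 0 then
        ((stripB fuel (PySem.Int.floordiv m d) d).1 + 1,
         (stripB fuel (PySem.Int.floordiv m d) d).2)
      else (0, m)

-- Source B's _factorize: smallest-factor-first recursion, list built on return.
-- Same fuel-as-totality-guard convention as stripB.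
def factB (fuel : Nat) (n d : Int) : List (Int × Int) :=
  match fuel with
  | 0 => []
  | fuel + 1 =>
      if 2 ≤ d ∧ d * d ≤ n then
        if PySem.Int.mod n d = 0 then
          (d, (stripB (n.toNat + 1) n d).1) ::
            factB fuel (stripB (n.toNat + 1) n d).2 (d + 1)
        else factB fuel n (d + 1)
      else if n ≠ 1 then [(n, 1)] else []

def altRec (facs : List (Int × Int)) (cands : List Int) : Int :=
  match facs with
  | [] => PySem.Int.powMod 2 cands.length MODP - 1
  | (p, e) :: rest =>
      altRec rest cands -
        altRec rest (cands.filter (fun x => ¬ PySem.Int.mod x (p ^ e.toNat) = 0))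

def countSubsetLcm_alt (nums : List Int) (lcm_ : Int) : Int :=
  let facs := factB (lcm_.toNat + 2) lcm_ 2
  let cands := nums.filter (fun x => PySem.Int.mod lcm_ x = 0)
  PySem.Int.mod (altRec facs.reverse cands) MODP

-- ===== PRECONDITION & SPEC =====
-- Pre_ excludes exactly the inputs where the Python A raises ZeroDivisionError:
-- 0 ∈ nums (lcm_ % 0), or lcm_ = 0 with nums nonempty (num % 0**1 inside the mask
-- loop, after lcm_ % num).  B raises on exactly the same inputs.
def Pre_countSubsetLcm (nums : List Int) (lcm_ : Int) : Prop :=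
  nums = [] ∨ (lcm_ ≠ 0 ∧ (0 : Int) ∉ nums)
instance (nums : List Int) (lcm_ : Int) : Decidable (Pre_countSubsetLcm nums lcm_) := by
  unfold Pre_countSubsetLcm; infer_instance

def pvWitness_countSubsetLcm : List Int × Int := ([2, 3, 6, 4, -6, 12], 12)

def Spec_countSubsetLcm (nums : List Int) (lcm_ : Int) (out : Int) : Prop := out = countSubsetLcm_alt nums lcm_
instance (nums : List Int) (lcm_ : Int) (out : Int) : Decidable (Spec_countSubsetLcm nums lcm_ out) := by unfold Spec_countSubsetLcm; infer_instance

-- ===== CLAIM (what is proved, stated in full; the proofs are below) =====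
def Claim_equal_countSubsetLcm : Prop := ∀ (nums : List Int) (lcm_ : Int), Dom_countSubsetLcm nums lcm_ → Pre_countSubsetLcm nums lcm_ → Spec_countSubsetLcm nums lcm_ (countSubsetLcm nums lcm_)

-- ===== LEMMAS AND PROOFS =====

-- B's fuel never runs out: stripB with fuel > m.toNat computes exactly A's
-- inner while-loop state
theorem stripB_gpfInner (d m c : Int) : ∀ (f : Nat), m.toNat < f →
    gpfInner d m c = (c + (stripB f m d).1, (stripB f m d).2) := by
  fun_induction gpfInner d m c with
  | case1 m c h ih =>
      intro f hf
      match f, hf with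
      | g + 1, hf =>
        rw [stripB, if_pos h]
        have hlt := gpfInner_dec h
        rw [ih g (by omega)]
        simp only [Prod.mk.injEq]
        exact ⟨by ring, trivial⟩
  | case2 m c h =>
      intro f hf
      match f, hf with
      | g + 1, hf =>
        rw [stripB, if_neg h]
        simp
-- B's recursive factorization equals A's accumulator loop (with the final
-- `upper != 1` append folded in), for any sufficient fuel
theorem gpfOuter_factB (upper i : Int) (res : List (Int × Int)) :
    ∀ (f : Nat), upper.toNat + 1 - i.toNat < f →
    (if (gpfOuter upper i res).1 ≠ 1
      then (gpfOuter upper i res).2 ++ [((gpfOuter upper i res).1, 1)]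
      else (gpfOuter upper i res).2) = res ++ factB f upper i := by
  fun_induction gpfOuter upper i res with
  | case1 n d res h hdvd r ih =>
      intro f hf
      match f, hf with
      | g + 1, hf =>
        rw [factB, if_pos h, if_pos hdvd]
        have hstrip := stripB_gpfInner d n 0 (n.toNat + 1) (by omega)
        have hr : r = ((stripB (n.toNat + 1) n d).1, (stripB (n.toNat + 1) n d).2) := by
          show gpfInner d n 0 = _
          rw [hstrip]
          simp
        have hdec := gpfOuter_dec1 h hdvd
        rw [hstrip] at hdec
        simp only at hdec
        rw [hr] at ih ⊢
        simp only at ih ⊢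
        rw [ih g (by omega)]
        simp [List.append_assoc]
  | case2 n d res h hdvd ih =>
      intro f hf
      match f, hf with
      | g + 1, hf =>
        rw [factB, if_pos h, if_neg hdvd]
        have hdec := gpfOuter_dec2 h
        exact ih g (by omega)
  | case3 n d res h =>
      intro f hf
      match f, hf with
      | g + 1, hf =>
        rw [factB, if_neg h]
        by_cases hn : n ≠ 1 <;> simp [hn]

theorem factB_eq (n : Int) : factB (n.toNat + 2) n 2 = getPrimeFactorsA n := by
  have h := gpfOuter_factB n 2 [] (n.toNat + 2) (by omega)
  simp only [List.nil_append] at h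
  rw [← h]
  rfl

-- the iterated single-bit transform on index functions: Trec sgn i g is the
-- per-index value after the passes for bits 0..i-1 (sgn = 1 : zeta `+=`,
-- sgn = -1 : Moebius `-=`)
def Trec (sgn : Int) : Nat → (Nat → Int) → Nat → Int
  | 0, g, x => g x
  | i + 1, g, x =>
      if x.testBit i then Trec sgn i g x + sgn * Trec sgn i g (x ^^^ (1 <<< i))
      else Trec sgn i g x

lemma bitcond_iff (pre i : Nat) : ((pre >>> i) &&& 1 = 0) ↔ pre.testBit i = false := by
  rw [Nat.and_one_is_mod, Nat.shiftRight_eq_div_pow, Nat.testBit_eq_decide_div_mod_eq]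
  simp only [decide_eq_false_iff_not]
  omega

lemma testBit_xor_shl (x i j : Nat) :
    (x ^^^ (1 <<< i)).testBit j = if j = i then !x.testBit i else x.testBit j := by
  rw [Nat.one_shiftLeft, Nat.testBit_xor, Nat.testBit_two_pow]
  by_cases h : j = i
  · simp [h]
  · have : ¬ i = j := by omega
    simp [h, this]

lemma xor_shl_of_testBit_false {k i : Nat} (h : k.testBit i = false) :
    k ^^^ (1 <<< i) = k ||| (1 <<< i) := by
  apply Nat.eq_of_testBit_eq
  intro j
  rw [testBit_xor_shl, Nat.testBit_or, Nat.one_shiftLeft, Nat.testBit_two_pow]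
  by_cases hj : j = i
  · simp [hj, h]
  · have : ¬ i = j := by omega
    simp [hj, this]

lemma or_shl_xor_cancel {k i : Nat} (h : k.testBit i = false) :
    (k ||| (1 <<< i)) ^^^ (1 <<< i) = k := by
  rw [← xor_shl_of_testBit_false h, Nat.xor_xor_cancel_right]

lemma testBit_or_shl_self (k i : Nat) : (k ||| (1 <<< i)).testBit i = true := by
  simp [Nat.testBit_or, Nat.one_shiftLeft, Nat.testBit_two_pow_self]

lemma shl_lt_pow {i m : Nat} (h : i < m) : (1 <<< i) < 2 ^ m := by
  rw [Nat.one_shiftLeft]; exact Nat.pow_lt_pow_right (by omega) h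

lemma set_map_range {N j : Nat} (f : Nat → Int) (v : Int) (hj : j < N) :
    ((List.range N).map f).set j v = (List.range N).map (fun x => if x = j then v else f x) := by
  apply List.ext_getElem (by simp)
  intro i h1 h2
  simp only [List.length_map, List.length_range] at h1
  simp [List.getElem_set, List.getElem_map, List.getElem_range]
  by_cases h : i = j
  · simp [h]
  · have : ¬ j = i := by omega
    simp [h, this]

-- the list state after the `pre`-loop of one pass has processed pre = 0..k-1
def hstage (sgn : Int) (i k : Nat) (g : Nat → Int) : Nat → Int := fun x =>
  if x.testBit i = true ∧ (x ^^^ (1 <<< i)) < k then g x + sgn * g (x ^^^ (1 <<< i)) else g x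

lemma sosPass_stage (sgn : Int) (m i : Nat) (him : i < m) (g : Nat → Int) :
    ∀ k, k ≤ 2 ^ m →
      (List.range k).foldl
        (fun acc pre =>
          if (pre >>> i) &&& 1 = 0 then
            acc.set (pre ||| (1 <<< i)) (acc.getD (pre ||| (1 <<< i)) 0 + sgn * acc.getD pre 0)
          else acc)
        ((List.range (2 ^ m)).map g)
      = (List.range (2 ^ m)).map (hstage sgn i k g) := by
  intro k
  induction k with
  | zero =>
      intro _
      simp [hstage]
  | succ k ih =>
      intro hk
      rw [List.range_succ, List.foldl_append, ih (by omega)]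
      simp only [List.foldl_cons, List.foldl_nil]
      by_cases hb : k.testBit i = true
      · rw [if_neg (by rw [bitcond_iff]; simp [hb])]
        apply List.map_congr_left
        intro x _
        unfold hstage
        have hne : x.testBit i = true → x ^^^ (1 <<< i) ≠ k := by
          intro hx he
          have : (x ^^^ (1 <<< i)).testBit i = !x.testBit i := by
            rw [testBit_xor_shl]; simp
          rw [he, hx, hb] at this
          simp at this
        by_cases hx1 : x.testBit i = true
        · have : ((x ^^^ (1 <<< i)) < k + 1) ↔ ((x ^^^ (1 <<< i)) < k) := by
            have := hne hx1; omega
          simp [hx1, this]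
        · simp [hx1]
      · have hb' : k.testBit i = false := by simpa using hb
        rw [if_pos ((bitcond_iff k i).mpr hb')]
        have hkN : k < 2 ^ m := by omega
        have hjN : (k ||| (1 <<< i)) < 2 ^ m := Nat.or_lt_two_pow hkN (shl_lt_pow him)
        rw [PySem.List.getD_map_range _ _ _ _ hjN, PySem.List.getD_map_range _ _ _ _ hkN]
        have hjval : hstage sgn i k g (k ||| (1 <<< i)) = g (k ||| (1 <<< i)) := by
          unfold hstage
          rw [or_shl_xor_cancel hb']
          simp
        have hkval : hstage sgn i k g k = g k := by
          unfold hstage; simp [hb']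
        rw [hjval, hkval, set_map_range _ _ hjN]
        apply List.map_congr_left
        intro x _
        by_cases hxj : x = k ||| (1 <<< i)
        · subst hxj
          rw [if_pos rfl]
          unfold hstage
          rw [if_pos ⟨testBit_or_shl_self k i, by rw [or_shl_xor_cancel hb']; omega⟩,
              or_shl_xor_cancel hb']
        · rw [if_neg hxj]
          unfold hstage
          have hne : x.testBit i = true → x ^^^ (1 <<< i) ≠ k := by
            intro hx he
            apply hxj
            rw [← xor_shl_of_testBit_false hb', ← he, Nat.xor_xor_cancel_right]
          by_cases hx1 : x.testBit i = true
          · have : ((x ^^^ (1 <<< i)) < k + 1) ↔ ((x ^^^ (1 <<< i)) < k) := by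
              have := hne hx1; omega
            simp [hx1, this]
          · simp [hx1]

lemma sosPass_map (sgn : Int) (m i : Nat) (him : i < m) (g : Nat → Int) :
    sosPass sgn i (2 ^ m) ((List.range (2 ^ m)).map g)
      = (List.range (2 ^ m)).map
          (fun x => if x.testBit i then g x + sgn * g (x ^^^ (1 <<< i)) else g x) := by
  unfold sosPass
  rw [sosPass_stage sgn m i him g (2 ^ m) le_rfl]
  apply List.map_congr_left
  intro x hx
  have hxN : x < 2 ^ m := List.mem_range.mp hx
  unfold hstage
  have hlt : (x ^^^ (1 <<< i)) < 2 ^ m := Nat.xor_lt_two_pow hxN (shl_lt_pow him)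
  by_cases hx1 : x.testBit i <;> simp [hx1, hlt]

lemma fold_sosPass (sgn : Int) (m : Nat) (g : Nat → Int) :
    ∀ k, k ≤ m →
      (List.range k).foldl (fun c i => sosPass sgn i (2 ^ m) c) ((List.range (2 ^ m)).map g)
        = (List.range (2 ^ m)).map (Trec sgn k g) := by
  intro k
  induction k with
  | zero => intro _; rfl
  | succ k ih =>
      intro hk
      rw [List.range_succ, List.foldl_append, ih (by omega)]
      simp only [List.foldl_cons, List.foldl_nil]
      rw [sosPass_map sgn m k (by omega)]
      apply List.map_congr_left
      intro x _
      simp [Trec]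

-- maskAux leaves bits below the running index alone …
lemma maskAux_testBit_lt (num : Int) :
    ∀ (fs : List (Int × Int)) (i0 acc j : Nat), j < i0 →
      (maskAux num i0 fs acc).testBit j = acc.testBit j
  | [], _, _, _, _ => rfl
  | (p, e) :: rest, i0, acc, j, hj => by
    rw [maskAux, maskAux_testBit_lt num rest (i0 + 1) _ j (by omega)]
    split
    · rw [Nat.testBit_or, Nat.one_shiftLeft, Nat.testBit_two_pow]
      simp [show ¬ i0 = j by omega]
    · rfl

-- … and bits past the end of the factor list …
lemma maskAux_testBit_ge (num : Int) :
    ∀ (fs : List (Int × Int)) (i0 acc j : Nat), i0 + fs.length ≤ j →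
      (maskAux num i0 fs acc).testBit j = acc.testBit j
  | [], _, _, _, _ => rfl
  | (p, e) :: rest, i0, acc, j, hj => by
    rw [maskAux, maskAux_testBit_ge num rest (i0 + 1) _ j (by simp at hj ⊢; omega)]
    split
    · rw [Nat.testBit_or, Nat.one_shiftLeft, Nat.testBit_two_pow]
      simp at hj
      simp [show ¬ i0 = j by omega]
    · rfl

-- … while bit (i0 + k) records divisibility by the k-th remaining prime power.
lemma maskAux_testBit_at (num : Int) :
    ∀ (fs : List (Int × Int)) (i0 acc j : Nat) (hj1 : i0 ≤ j) (hj2 : j - i0 < fs.length),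
      (maskAux num i0 fs acc).testBit j =
        (acc.testBit j || decide (PySem.Int.mod num ((fs[j - i0].1) ^ (fs[j - i0].2.toNat)) = 0))
  | [], _, _, _, _, hj2 => by simp at hj2
  | (p, e) :: rest, i0, acc, j, hj1, hj2 => by
    by_cases hji : j = i0
    · subst hji
      rw [maskAux, maskAux_testBit_lt num rest (j + 1) _ j (by omega)]
      simp only [Nat.sub_self, List.getElem_cons_zero]
      split
      · rename_i hdiv
        rw [Nat.testBit_or, Nat.one_shiftLeft, Nat.testBit_two_pow_self]
        simp [hdiv]
      · rename_i hdiv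
        simp [hdiv]
    · have h1 : i0 + 1 ≤ j := by omega
      have h3 : j - i0 = (j - (i0 + 1)) + 1 := by omega
      rw [maskAux, maskAux_testBit_at num rest (i0 + 1) _ j h1 (by simp at hj2; omega)]
      simp only [h3, List.getElem_cons_succ]
      split
      · rw [Nat.testBit_or, Nat.one_shiftLeft, Nat.testBit_two_pow]
        simp [show ¬ i0 = j by omega]
      · rfl

lemma maskAux_lt (num : Int) (fs : List (Int × Int)) :
    maskAux num 0 fs 0 < 2 ^ fs.length := by
  apply Nat.lt_pow_two_of_testBit
  intro i hi
  rw [maskAux_testBit_ge num fs 0 0 i (by omega)]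
  exact Nat.zero_testBit i

-- the mask-count loop over nums, on a list presented as (range N).map f
lemma build_fold (lcm_ : Int) (pfs : List (Int × Int)) :
    ∀ (nums : List Int) (f : Nat → Int),
      nums.foldl (buildStep lcm_ pfs) ((List.range (2 ^ pfs.length)).map f)
        = (List.range (2 ^ pfs.length)).map
            (fun t => f t +
              (nums.countP (fun v =>
                decide (PySem.Int.mod lcm_ v = 0) && decide (maskAux v 0 pfs 0 = t)) : Int))
  | [], f => by simp
  | num :: nums, f => by
    simp only [List.foldl_cons]
    by_cases hd : PySem.Int.mod lcm_ num ≠ 0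
    · rw [show buildStep lcm_ pfs ((List.range (2 ^ pfs.length)).map f) num
            = (List.range (2 ^ pfs.length)).map f by unfold buildStep; rw [if_pos hd]]
      rw [build_fold lcm_ pfs nums f]
      apply List.map_congr_left
      intro t _
      have : decide (PySem.Int.mod lcm_ num = 0) = false := by simpa using hd
      simp [List.countP_cons, this]
    · push_neg at hd
      have hm : maskAux num 0 pfs 0 < 2 ^ pfs.length := maskAux_lt num pfs
      rw [show buildStep lcm_ pfs ((List.range (2 ^ pfs.length)).map f) num
            = (List.range (2 ^ pfs.length)).map
                (fun x => if x = maskAux num 0 pfs 0 then f (maskAux num 0 pfs 0) + 1 else f x) by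
        unfold buildStep
        rw [if_neg (by simpa using hd)]
        simp only []
        rw [PySem.List.getD_map_range _ _ _ _ hm, set_map_range _ _ hm]]
      rw [build_fold lcm_ pfs nums _]
      apply List.map_congr_left
      intro t _
      have hdt : decide (PySem.Int.mod lcm_ num = 0) = true := by simpa using hd
      by_cases hts : t = maskAux num 0 pfs 0
      · subst hts
        simp [List.countP_cons, hdt]
        push_cast
        ring
      · have hne : ¬ maskAux num 0 pfs 0 = t := by omega
        simp [List.countP_cons, hne, hts]

-- `u ||| (x &&& (2^i - 1)) = x` says: u is a submask of x agreeing with x above bit i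
def AgreeUp (i u x : Nat) : Prop :=
  (∀ j, i ≤ j → u.testBit j = x.testBit j) ∧ ∀ j, u.testBit j = true → x.testBit j = true

lemma cond_iff (i u x : Nat) : u ||| (x &&& (2 ^ i - 1)) = x ↔ AgreeUp i u x := by
  constructor
  · intro h
    have hb : ∀ j, (u.testBit j || (decide (j < i) && x.testBit j)) = x.testBit j := by
      intro j
      have := congrArg (fun n => n.testBit j) h
      simpa [Nat.testBit_or, Nat.testBit_and, Nat.testBit_two_pow_sub_one] using this
    constructor
    · intro j hj
      have := hb j
      rw [decide_eq_false (by omega : ¬ j < i)] at this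
      simpa using this
    · intro j hju
      have := hb j
      rw [hju] at this
      simpa using this
  · intro h
    obtain ⟨h1, h2⟩ := h
    apply Nat.eq_of_testBit_eq
    intro j
    rw [Nat.testBit_or, Nat.testBit_and, Nat.testBit_two_pow_sub_one]
    by_cases hj : j < i
    · rw [decide_eq_true hj]
      cases hu : u.testBit j
      · simp
      · simp [h2 j hu]
    · rw [decide_eq_false hj]
      simp [h1 j (by omega)]

lemma agree_step_false {i u x : Nat} (hx : x.testBit i = false) :
    AgreeUp (i + 1) u x ↔ AgreeUp i u x := by
  constructor
  · intro h
    obtain ⟨h1, h2⟩ := h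
    refine ⟨fun j hj => ?_, h2⟩
    by_cases hji : j = i
    · subst hji
      cases hu : u.testBit j
      · rw [hx]
      · exact absurd (h2 j hu) (by simp [hx])
    · exact h1 j (by omega)
  · intro h
    exact ⟨fun j hj => h.1 j (by omega), h.2⟩

lemma agree_step_true {i u x : Nat} (hx : x.testBit i = true) :
    AgreeUp (i + 1) u x ↔ (AgreeUp i u x ∨ AgreeUp i u (x ^^^ (1 <<< i))) := by
  constructor
  · intro h
    obtain ⟨h1, h2⟩ := h
    cases hu : u.testBit i
    · right
      refine ⟨fun j hj => ?_, fun j hju => ?_⟩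
      · rw [testBit_xor_shl]
        by_cases hji : j = i
        · subst hji; simp [hx, hu]
        · rw [if_neg hji]
          exact h1 j (by omega)
      · rw [testBit_xor_shl]
        by_cases hji : j = i
        · subst hji; rw [hju] at hu; simp at hu
        · rw [if_neg hji]
          exact h2 j hju
    · left
      refine ⟨fun j hj => ?_, h2⟩
      by_cases hji : j = i
      · subst hji; rw [hu, hx]
      · exact h1 j (by omega)
  · rintro (⟨h1, h2⟩ | ⟨h1, h2⟩)
    · exact ⟨fun j hj => h1 j (by omega), h2⟩
    · refine ⟨fun j hj => ?_, fun j hju => ?_⟩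
      · have := h1 j (by omega)
        rw [testBit_xor_shl, if_neg (by omega)] at this
        exact this
      · have := h2 j hju
        rw [testBit_xor_shl] at this
        by_cases hji : j = i
        · subst hji; exact hx
        · rw [if_neg hji] at this; exact this

lemma agree_disjoint {i u x : Nat} (hx : x.testBit i = true) :
    ¬(AgreeUp i u x ∧ AgreeUp i u (x ^^^ (1 <<< i))) := by
  rintro ⟨⟨h1, _⟩, ⟨g1, _⟩⟩
  have e1 := h1 i le_rfl
  have e2 := g1 i le_rfl
  rw [testBit_xor_shl, if_pos rfl, hx] at e2
  rw [hx] at e1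
  rw [e1] at e2
  simp at e2

lemma countP_or_disjoint {α : Type} (l : List α) (p q r : α → Bool)
    (h : ∀ v, r v = (p v || q v)) (hd : ∀ v, ¬(p v = true ∧ q v = true)) :
    l.countP r = l.countP p + l.countP q := by
  induction l with
  | nil => simp
  | cons v vs ih =>
      simp only [List.countP_cons, ih, h v]
      have := hd v
      cases hp : p v <;> cases hq : q v <;> simp_all <;> omega

lemma countP_congr' {α : Type} (l : List α) (p q : α → Bool) (h : ∀ v, p v = q v) :
    l.countP p = l.countP q := by
  induction l with
  | nil => rfl
  | cons v vs ih => simp [List.countP_cons, ih, h v]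

-- zeta characterisation: after all i passes, index x holds the number of
-- candidates whose mask is a submask of x agreeing with x above bit i
lemma Trec_zeta_count (pfs : List (Int × Int)) (cs : List Int) :
    ∀ (i x : Nat),
      Trec 1 i (fun t => (cs.countP (fun v => decide (maskAux v 0 pfs 0 = t)) : Int)) x
        = (cs.countP (fun v => decide (maskAux v 0 pfs 0 ||| (x &&& (2 ^ i - 1)) = x)) : Int)
  | 0, x => by
      show ((cs.countP _ : Nat) : Int) = _
      congr 1
      apply countP_congr'
      intro v
      have : (x &&& (2 ^ 0 - 1)) = 0 := by simp
      simp [this]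
  | i + 1, x => by
      rw [Trec]
      by_cases hx : x.testBit i
      · rw [if_pos hx, Trec_zeta_count pfs cs i x, Trec_zeta_count pfs cs i (x ^^^ (1 <<< i))]
        rw [one_mul, ← Nat.cast_add]
        congr 1
        refine (countP_or_disjoint cs _ _ _ (fun v => ?_) (fun v => ?_)).symm
        · have hiff : (maskAux v 0 pfs 0 ||| (x &&& (2 ^ (i + 1) - 1)) = x)
              ↔ ((maskAux v 0 pfs 0 ||| (x &&& (2 ^ i - 1)) = x)
                  ∨ (maskAux v 0 pfs 0 ||| ((x ^^^ (1 <<< i)) &&& (2 ^ i - 1)) = x ^^^ (1 <<< i))) := by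
            rw [cond_iff, cond_iff, cond_iff]
            exact agree_step_true hx
          by_cases hB : maskAux v 0 pfs 0 ||| (x &&& (2 ^ i - 1)) = x
          · rw [decide_eq_true (hiff.mpr (Or.inl hB)), decide_eq_true hB]
            simp
          · by_cases hC : maskAux v 0 pfs 0 ||| ((x ^^^ (1 <<< i)) &&& (2 ^ i - 1)) = x ^^^ (1 <<< i)
            · rw [decide_eq_true (hiff.mpr (Or.inr hC)), decide_eq_true hC]
              simp
            · rw [decide_eq_false (fun hA => (hiff.mp hA).elim hB hC),
                  decide_eq_false hB, decide_eq_false hC]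
              rfl
        · rintro ⟨hp, hq⟩
          rw [decide_eq_true_eq] at hp hq
          rw [cond_iff] at hp hq
          exact agree_disjoint hx ⟨hp, hq⟩
      · simp only [Bool.not_eq_true] at hx
        rw [if_neg (by simp [hx]), Trec_zeta_count pfs cs i x]
        congr 1
        apply countP_congr'
        intro v
        apply decide_eq_decide.mpr
        rw [cond_iff, cond_iff]
        exact (agree_step_false hx).symm

lemma altRec_nil_cands (fs : List (Int × Int)) : altRec fs [] = 0 := by
  cases fs with
  | nil =>
      show PySem.Int.powMod 2 (List.length []) MODP - 1 = 0
      decide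
  | cons q rest =>
      obtain ⟨p, e⟩ := q
      show altRec rest [] - altRec rest (List.filter _ []) = 0
      simp

lemma take_succ_reverse {α : Type} (l : List α) (i : Nat) (hi : i < l.length) :
    (l.take (i + 1)).reverse = l[i] :: (l.take i).reverse := by
  rw [List.take_add_one, List.getElem?_eq_getElem hi]
  simp

lemma or_eq_xor_iff {u x i : Nat} (hxi : x.testBit i = true) :
    (u ||| (x ^^^ (1 <<< i)) = x ^^^ (1 <<< i)) ↔ (u ||| x = x ∧ u.testBit i = false) := by
  constructor
  · intro h
    have hb : ∀ j, (u.testBit j || (x ^^^ (1 <<< i)).testBit j) = (x ^^^ (1 <<< i)).testBit j := by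
      intro j
      have := congrArg (fun n => n.testBit j) h
      simpa [Nat.testBit_or] using this
    have hui : u.testBit i = false := by
      have := hb i
      rw [testBit_xor_shl, if_pos rfl, hxi] at this
      simpa using this
    refine ⟨?_, hui⟩
    apply Nat.eq_of_testBit_eq
    intro j
    rw [Nat.testBit_or]
    by_cases hji : j = i
    · subst hji
      rw [hui, hxi]
      simp
    · have := hb j
      rw [testBit_xor_shl, if_neg hji] at this
      exact this
  · intro h
    obtain ⟨h, hui⟩ := h
    have hb : ∀ j, (u.testBit j || x.testBit j) = x.testBit j := by
      intro j
      have := congrArg (fun n => n.testBit j) h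
      simpa [Nat.testBit_or] using this
    apply Nat.eq_of_testBit_eq
    intro j
    rw [Nat.testBit_or, testBit_xor_shl]
    by_cases hji : j = i
    · subst hji
      simp [hui]
    · rw [if_neg hji]
      exact hb j

lemma or_full_eq {u m : Nat} (hu : u < 2 ^ m) : u ||| (2 ^ m - 1) = 2 ^ m - 1 := by
  apply Nat.eq_of_testBit_eq
  intro j
  rw [Nat.testBit_or, Nat.testBit_two_pow_sub_one]
  by_cases hj : j < m
  · simp [hj]
  · simp only [decide_eq_false hj, Bool.or_false]
    exact Nat.testBit_lt_two_pow (by calc u < 2 ^ m := hu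
                                        _ ≤ 2 ^ j := Nat.pow_le_pow_right (by omega) (by omega))

-- B's inclusion-exclusion recursion computes the Moebius transform of
-- t ↦ 2^(number of candidates with mask ⊆ t) - 1
lemma altRec_Trec (pfs : List (Int × Int)) (cs : List Int) :
    ∀ (i : Nat), i ≤ pfs.length → ∀ (x : Nat), (∀ j, j < i → x.testBit j = true) →
      altRec (pfs.take i).reverse
          (cs.filter (fun v => decide (maskAux v 0 pfs 0 ||| x = x)))
        = Trec (-1) i
            (fun t =>
              PySem.Int.powMod 2
                (cs.countP (fun v => decide (maskAux v 0 pfs 0 ||| t = t))) MODP - 1) x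
  | 0, _, x, _ => by
      show PySem.Int.powMod 2 (List.length _) MODP - 1 = _
      rw [← List.countP_eq_length_filter]
      rfl
  | i + 1, hi, x, hbits => by
      have hxi : x.testBit i = true := hbits i (by omega)
      have hilen : i < pfs.length := by omega
      rw [take_succ_reverse pfs i hilen]
      rcases hq : pfs[i] with ⟨p, e⟩
      rw [altRec]
      rw [altRec_Trec pfs cs i (by omega) x (fun j hj => hbits j (by omega))]
      rw [List.filter_filter]
      have hx' : ∀ j, j < i → (x ^^^ (1 <<< i)).testBit j = true := by
        intro j hj
        rw [testBit_xor_shl, if_neg (by omega)]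
        exact hbits j (by omega)
      have hpred : ∀ v ∈ cs,
          (decide (¬ PySem.Int.mod v (p ^ e.toNat) = 0) &&
            decide (maskAux v 0 pfs 0 ||| x = x))
          = decide (maskAux v 0 pfs 0 ||| (x ^^^ (1 <<< i)) = x ^^^ (1 <<< i)) := by
        intro v _
        have hmb : (maskAux v 0 pfs 0).testBit i
            = decide (PySem.Int.mod v (p ^ e.toNat) = 0) := by
          rw [maskAux_testBit_at v pfs 0 0 i (by omega) (by simpa using hilen)]
          simp only [Nat.sub_zero, hq]
          rw [Nat.zero_testBit, Bool.false_or]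
        rw [show (decide (maskAux v 0 pfs 0 ||| (x ^^^ (1 <<< i)) = x ^^^ (1 <<< i)))
              = decide (maskAux v 0 pfs 0 ||| x = x ∧ (maskAux v 0 pfs 0).testBit i = false)
            from decide_eq_decide.mpr (or_eq_xor_iff hxi)]
        rw [hmb]
        cases hdv : decide (PySem.Int.mod v (p ^ e.toNat) = 0) <;>
          cases hsx : decide (maskAux v 0 pfs 0 ||| x = x) <;> simp [hdv, hsx]
      rw [List.filter_congr hpred,
          altRec_Trec pfs cs i (by omega) (x ^^^ (1 <<< i)) hx']
      rw [Trec, if_pos hxi]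
      ring

-- the A-side chain assembled for nonempty nums: both sides are the Moebius value
theorem countSubsetLcm_spec_aux (nums : List Int) (lcm_ : Int) (hnil : nums ≠ []) :
    countSubsetLcm nums lcm_ = countSubsetLcm_alt nums lcm_ := by
  unfold countSubsetLcm countSubsetLcm_alt
  rw [if_neg hnil, factB_eq]
  simp only [Nat.one_shiftLeft]
  set pfs := getPrimeFactorsA lcm_ with hpfs
  set m := pfs.length with hm
  set cands := nums.filter (fun x => decide (PySem.Int.mod lcm_ x = 0)) with hcands
  -- counter after the build loop
  have hrepl : (List.replicate (2 ^ m) (0 : Int)) = (List.range (2 ^ m)).map (fun _ => (0 : Int)) := by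
    rw [List.map_const', List.length_range]
  rw [hrepl, build_fold lcm_ pfs nums (fun _ => 0)]
  -- rewrite the per-mask count over nums as a count over cands
  have hcnt : (fun t => (0 : Int) +
        (nums.countP (fun v =>
          decide (PySem.Int.mod lcm_ v = 0) && decide (maskAux v 0 pfs 0 = t)) : Int))
      = (fun t => (cands.countP (fun v => decide (maskAux v 0 pfs 0 = t)) : Int)) := by
    funext t
    rw [zero_add, hcands, List.countP_filter]
    congr 1
    apply countP_congr'
    intro v
    cases h1 : decide (PySem.Int.mod lcm_ v = 0) <;>
      cases h2 : decide (maskAux v 0 pfs 0 = t) <;> simp [h1, h2]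
  rw [hcnt]
  -- zeta passes
  rw [fold_sosPass 1 m _ m le_rfl]
  -- dp construction
  have hdp : (List.range (2 ^ m)).map
        (fun t => PySem.Int.powMod 2
          (((List.range (2 ^ m)).map
              (Trec 1 m (fun t => (cands.countP (fun v => decide (maskAux v 0 pfs 0 = t)) : Int)))).getD t 0).toNat MODP - 1)
      = (List.range (2 ^ m)).map
          (fun t => PySem.Int.powMod 2
            (cands.countP (fun v => decide (maskAux v 0 pfs 0 ||| t = t))) MODP - 1) := by
    apply List.map_congr_left
    intro t ht
    have htN : t < 2 ^ m := List.mem_range.mp ht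
    rw [PySem.List.getD_map_range _ _ _ _ htN]
    rw [Trec_zeta_count pfs cands m t]
    rw [Int.toNat_natCast]
    congr 2
    apply countP_congr'
    intro v
    apply decide_eq_decide.mpr
    rw [show t &&& (2 ^ m - 1) = t from by
      rw [Nat.and_two_pow_sub_one_eq_mod, Nat.mod_eq_of_lt htN]]
  rw [hdp]
  -- Moebius passes
  rw [fold_sosPass (-1) m _ m le_rfl]
  -- dp[-1]
  have hlen : ((List.range (2 ^ m)).map
      (Trec (-1) m (fun t => PySem.Int.powMod 2
        (cands.countP (fun v => decide (maskAux v 0 pfs 0 ||| t = t))) MODP - 1))).length = 2 ^ m := by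
    simp
  have hpos : 0 < 2 ^ m := Nat.two_pow_pos m
  rw [PySem.List.pyGet?_neg_ofNat _ 1 (by omega) (by rw [hlen]; omega)]
  rw [hlen]
  rw [List.getElem?_map, List.getElem?_range (by omega)]
  simp only [Option.map_some, Option.getD_some]
  -- B side
  have hBtr := altRec_Trec pfs cands m le_rfl (2 ^ m - 1)
        (fun j hj => by rw [Nat.testBit_two_pow_sub_one]; exact decide_eq_true hj)
  rw [List.filter_eq_self.mpr
        (fun v _ => decide_eq_true (or_full_eq (maskAux_lt v pfs))),
      show pfs.take m = pfs from List.take_length] at hBtr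
  rw [hBtr]

-- ===== VERDICT (by name: the statement is the Claim_ definition above) =====
theorem countSubsetLcm_spec : Claim_equal_countSubsetLcm := by
  intro nums lcm_ _ _
  unfold Spec_countSubsetLcm
  by_cases hnil : nums = []
  · subst hnil
    show (0 : Int) = countSubsetLcm_alt [] lcm_
    unfold countSubsetLcm_alt
    simp only [List.filter_nil]
    rw [altRec_nil_cands]
    decide
  · exact countSubsetLcm_spec_aux nums lcm_ hnil
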